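-- pv_equiv track=rewrite | github.com/lonewaler/ofsec | backend/app/services/ai/self_learning.py | extract_scan_features
-- ===== SOURCE A (Python) =====
-- from collections import defaultdict
--
-- def extract_scan_features(scan_result: dict) -> dict:
--     """Extract ML features from a scan result."""
--     findings = scan_result.get("findings", [])
--     severity_counts = defaultdict(int)
--     type_counts = defaultdict(int)
--
--     for f in findings:
--         severity_counts[f.get("severity", "info")] += 1
--         type_counts[f.get("type", "unknown")] += 1
--
--     return {
--         "total_findings": len(findings),
--         "critical_vulns": severity_counts.get("critical", 0),
--         "high_vulns": severity_counts.get("high", 0),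
--         "medium_vulns": severity_counts.get("medium", 0),
--         "low_vulns": severity_counts.get("low", 0),
--         "unique_vuln_types": len(type_counts),
--         "has_rce": 1 if any("rce" in t.lower() or "command" in t.lower() for t in type_counts) else 0,
--         "has_sqli": 1 if any("sql" in t.lower() for t in type_counts) else 0,
--         "has_xss": 1 if any("xss" in t.lower() for t in type_counts) else 0,
--         "has_auth_issue": 1 if any("credential" in t.lower() or "auth" in t.lower() for t in type_counts) else 0,
--     }
-- ===== SOURCE B (Python) =====
-- def extract_scan_features(scan_result: dict) -> dict:
--     """Extract ML features from a scan result (single pass, scalar accumulators)."""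
--     findings = scan_result.get("findings", [])
--     total = crit = high = med = low = 0
--     seen = set()
--     has_rce = has_sqli = has_xss = has_auth = False
--     for f in findings:
--         total += 1
--         sev = f.get("severity", "info")
--         if sev == "critical":
--             crit += 1
--         elif sev == "high":
--             high += 1
--         elif sev == "medium":
--             med += 1
--         elif sev == "low":
--             low += 1
--         t = f.get("type", "unknown")
--         tl = t.lower()
--         has_rce = has_rce or "rce" in tl or "command" in tl
--         has_sqli = has_sqli or "sql" in tl
--         has_xss = has_xss or "xss" in tl
--         has_auth = has_auth or "credential" in tl or "auth" in tl
--         seen.add(t)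
--     return {
--         "total_findings": total,
--         "critical_vulns": crit,
--         "high_vulns": high,
--         "medium_vulns": med,
--         "low_vulns": low,
--         "unique_vuln_types": len(seen),
--         "has_rce": 1 if has_rce else 0,
--         "has_sqli": 1 if has_sqli else 0,
--         "has_xss": 1 if has_xss else 0,
--         "has_auth_issue": 1 if has_auth else 0,
--     }
-- ===== Notes on version B (the rewrite author's own statement) =====
-- stated objective: alternative
-- what changed: Replaces the two defaultdict count tables plus four post-loop any() scans over the type table with a single pass that keeps scalar severity counters, a set of seen types, and four boolean flags OR-ed in as each finding is read.
import Mathlib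
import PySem

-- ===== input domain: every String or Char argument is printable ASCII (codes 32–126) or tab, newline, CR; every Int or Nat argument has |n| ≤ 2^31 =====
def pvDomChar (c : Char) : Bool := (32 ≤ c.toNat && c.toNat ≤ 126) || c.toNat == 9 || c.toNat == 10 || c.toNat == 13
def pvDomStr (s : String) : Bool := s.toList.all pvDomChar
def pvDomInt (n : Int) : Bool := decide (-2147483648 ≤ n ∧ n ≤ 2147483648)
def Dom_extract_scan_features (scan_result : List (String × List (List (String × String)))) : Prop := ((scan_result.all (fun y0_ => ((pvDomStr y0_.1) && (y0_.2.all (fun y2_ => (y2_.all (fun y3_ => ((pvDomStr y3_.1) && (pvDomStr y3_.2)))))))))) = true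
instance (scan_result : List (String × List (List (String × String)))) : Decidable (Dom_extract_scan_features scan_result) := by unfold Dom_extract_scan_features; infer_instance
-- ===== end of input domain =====

-- B replaces A's two defaultdict tables and four post-loop any() scans by one pass with
-- scalar severity counters, a set of seen types and four boolean flags (objective: alternative).

-- ===== PORT A =====
def extract_scan_features (scan_result : List (String × List (List (String × String)))) : List (String × Int) :=
  let findings := PySem.Dict.getD (PySem.Dict.ofList scan_result) "findings" []
  let counts := findings.foldl
    (fun (p : PySem.Dict String Int × PySem.Dict String Int) f =>
      (PySem.Dict.modify p.1 (PySem.Dict.getD (PySem.Dict.ofList f) "severity" "info") 0 (· + 1),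
       PySem.Dict.modify p.2 (PySem.Dict.getD (PySem.Dict.ofList f) "type" "unknown") 0 (· + 1)))
    (PySem.Dict.empty, PySem.Dict.empty)
  let severity_counts := counts.1
  let type_counts := counts.2
  [("total_findings", (findings.length : Int)),
   ("critical_vulns", PySem.Dict.getD severity_counts "critical" 0),
   ("high_vulns", PySem.Dict.getD severity_counts "high" 0),
   ("medium_vulns", PySem.Dict.getD severity_counts "medium" 0),
   ("low_vulns", PySem.Dict.getD severity_counts "low" 0),
   ("unique_vuln_types", (PySem.Dict.size type_counts : Int)),
   ("has_rce", if (PySem.Dict.keys type_counts).any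
       (fun t => PySem.Str.isIn "rce" (PySem.Str.lower t) || PySem.Str.isIn "command" (PySem.Str.lower t)) then 1 else 0),
   ("has_sqli", if (PySem.Dict.keys type_counts).any
       (fun t => PySem.Str.isIn "sql" (PySem.Str.lower t)) then 1 else 0),
   ("has_xss", if (PySem.Dict.keys type_counts).any
       (fun t => PySem.Str.isIn "xss" (PySem.Str.lower t)) then 1 else 0),
   ("has_auth_issue", if (PySem.Dict.keys type_counts).any
       (fun t => PySem.Str.isIn "credential" (PySem.Str.lower t) || PySem.Str.isIn "auth" (PySem.Str.lower t)) then 1 else 0)]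

-- ===== PORT B =====
structure BSt where
  total : Int
  crit : Int
  high : Int
  med : Int
  low : Int
  seen : PySem.Set String
  rce : Bool
  sqli : Bool
  xss : Bool
  auth : Bool
deriving Repr, DecidableEq

def bStep (s : BSt) (f : List (String × String)) : BSt :=
  let sev := PySem.Dict.getD (PySem.Dict.ofList f) "severity" "info"
  let s := { s with total := s.total + 1 }
  let s :=
    if sev = "critical" then { s with crit := s.crit + 1 }
    else if sev = "high" then { s with high := s.high + 1 }
    else if sev = "medium" then { s with med := s.med + 1 }
    else if sev = "low" then { s with low := s.low + 1 }
    else s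
  let t := PySem.Dict.getD (PySem.Dict.ofList f) "type" "unknown"
  let tl := PySem.Str.lower t
  { s with
    rce := s.rce || (PySem.Str.isIn "rce" tl || PySem.Str.isIn "command" tl),
    sqli := s.sqli || PySem.Str.isIn "sql" tl,
    xss := s.xss || PySem.Str.isIn "xss" tl,
    auth := s.auth || (PySem.Str.isIn "credential" tl || PySem.Str.isIn "auth" tl),
    seen := PySem.Set.add s.seen t }

def extract_scan_features_alt (scan_result : List (String × List (List (String × String)))) : List (String × Int) :=
  let findings := PySem.Dict.getD (PySem.Dict.ofList scan_result) "findings" []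
  let s := findings.foldl bStep ⟨0, 0, 0, 0, 0, PySem.Set.empty, false, false, false, false⟩
  [("total_findings", s.total),
   ("critical_vulns", s.crit),
   ("high_vulns", s.high),
   ("medium_vulns", s.med),
   ("low_vulns", s.low),
   ("unique_vuln_types", (PySem.Set.len s.seen : Int)),
   ("has_rce", if s.rce then 1 else 0),
   ("has_sqli", if s.sqli then 1 else 0),
   ("has_xss", if s.xss then 1 else 0),
   ("has_auth_issue", if s.auth then 1 else 0)]

-- ===== PRECONDITION & SPEC =====
def Spec_extract_scan_features (scan_result : List (String × List (List (String × String)))) (out : List (String × Int)) : Prop := out = extract_scan_features_alt scan_result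
instance (scan_result : List (String × List (List (String × String)))) (out : List (String × Int)) : Decidable (Spec_extract_scan_features scan_result out) := by unfold Spec_extract_scan_features; infer_instance

-- ===== CLAIM (what is proved, stated in full; the proofs are below) =====
def Claim_equal_extract_scan_features : Prop := ∀ (scan_result : List (String × List (List (String × String)))), Dom_extract_scan_features scan_result → Spec_extract_scan_features scan_result (extract_scan_features scan_result)

-- ===== LEMMAS AND PROOFS =====
def sevOf (f : List (String × String)) : String := PySem.Dict.getD (PySem.Dict.ofList f) "severity" "info"
def tyOf (f : List (String × String)) : String := PySem.Dict.getD (PySem.Dict.ofList f) "type" "unknown"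

theorem b_loop (l : List (List (String × String))) (s : BSt) :
    l.foldl bStep s =
      { total := s.total + l.length,
        crit := s.crit + ((l.map sevOf).count "critical" : Int),
        high := s.high + ((l.map sevOf).count "high" : Int),
        med := s.med + ((l.map sevOf).count "medium" : Int),
        low := s.low + ((l.map sevOf).count "low" : Int),
        seen := PySem.Set.update s.seen (l.map tyOf),
        rce := s.rce || (l.map tyOf).any
          (fun t => PySem.Str.isIn "rce" (PySem.Str.lower t) || PySem.Str.isIn "command" (PySem.Str.lower t)),
        sqli := s.sqli || (l.map tyOf).any (fun t => PySem.Str.isIn "sql" (PySem.Str.lower t)),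
        xss := s.xss || (l.map tyOf).any (fun t => PySem.Str.isIn "xss" (PySem.Str.lower t)),
        auth := s.auth || (l.map tyOf).any
          (fun t => PySem.Str.isIn "credential" (PySem.Str.lower t) || PySem.Str.isIn "auth" (PySem.Str.lower t)) } := by
  induction l generalizing s with
  | nil => simp [PySem.Set.update]
  | cons f rest ih =>
      rw [List.foldl_cons, ih]
      simp only [bStep, sevOf, tyOf, List.map_cons, List.count_cons, List.any_cons,
        PySem.Set.update, List.foldl_cons, List.length_cons]
      split_ifs <;> simp_all [Bool.or_assoc] <;> omega

theorem any_ofList (xs : List String) (p : String → Bool) :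
    (PySem.Set.ofList xs).any p = xs.any p := by
  apply Bool.eq_iff_iff.mpr
  simp only [List.any_eq_true]
  constructor
  · rintro ⟨x, hx, hp⟩; exact ⟨x, (PySem.Set.mem_ofList _ _).mp hx, hp⟩
  · rintro ⟨x, hx, hp⟩; exact ⟨x, (PySem.Set.mem_ofList _ _).mpr hx, hp⟩

theorem sc_getD (l : List (List (String × String))) (v : String) :
    (l.foldl (fun d f => PySem.Dict.modify d (PySem.Dict.getD (PySem.Dict.ofList f) "severity" "info") 0 (· + 1))
        PySem.Dict.empty).getD v 0 = ((l.map sevOf).count v : Int) := by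
  rw [show (fun d f => PySem.Dict.modify d (PySem.Dict.getD (PySem.Dict.ofList f) "severity" "info") 0 (· + 1))
        = (fun (d : PySem.Dict String Int) f => PySem.Dict.modify d (sevOf f) 0 (· + 1)) from rfl,
      ← List.foldl_map (f := sevOf) (g := fun (d : PySem.Dict String Int) x => PySem.Dict.modify d x 0 (· + 1))]
  simp [PySem.Dict.getD_foldl_modify_add_one]

theorem tc_eq (l : List (List (String × String))) :
    (l.foldl (fun d f => PySem.Dict.modify d (PySem.Dict.getD (PySem.Dict.ofList f) "type" "unknown") 0 (· + 1))
        PySem.Dict.empty) = PySem.Dict.counter (l.map tyOf) := by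
  rw [show (fun d f => PySem.Dict.modify d (PySem.Dict.getD (PySem.Dict.ofList f) "type" "unknown") 0 (· + 1))
        = (fun (d : PySem.Dict String Int) f => PySem.Dict.modify d (tyOf f) 0 (· + 1)) from rfl,
      ← List.foldl_map (f := tyOf) (g := fun (d : PySem.Dict String Int) x => PySem.Dict.modify d x 0 (· + 1)),
      PySem.Dict.counter_eq_foldl]

theorem size_counter (xs : List String) :
    (PySem.Dict.counter xs).size = (PySem.Set.ofList xs).length := by
  have h := PySem.Dict.keys_counter (xs := xs)
  calc (PySem.Dict.counter xs).size = (PySem.Dict.counter xs).keys.length := by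
        simp [PySem.Dict.size, PySem.Dict.keys]
    _ = (PySem.Set.ofList xs).length := by rw [h]

-- ===== VERDICT (by name: the statement is the Claim_ definition above) =====
theorem extract_scan_features_spec : Claim_equal_extract_scan_features := by
  intro scan_result _
  unfold Spec_extract_scan_features
  simp only [extract_scan_features, extract_scan_features_alt]
  rw [PySem.List.foldl_prod_mk
    (f := fun d f => PySem.Dict.modify d (PySem.Dict.getD (PySem.Dict.ofList f) "severity" "info") 0 (· + 1))
    (g := fun d f => PySem.Dict.modify d (PySem.Dict.getD (PySem.Dict.ofList f) "type" "unknown") 0 (· + 1))]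
  simp only [b_loop, sc_getD, tc_eq, PySem.Dict.keys_counter, any_ofList, size_counter,
    PySem.Set.update_empty, PySem.Set.len, zero_add, Bool.false_or]
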